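-- pv_equiv track=rewrite | github.com/MaritoLK/demo_tunnels_simulation | backend/app/engine/skill.py | reveal_radius_for
-- ===== SOURCE A (Python) =====
-- WALK_SKILL_TIERS = (
--     (0,   1),   # apprentice: 3x3
--     (50,  2),   # journeyman: 5x5
--     (150, 3),   # veteran:    7x7
-- )
--
-- def reveal_radius_for(tiles_walked):
--     """Return the reveal radius for an agent who has walked this many
--     tiles. Increasing — never shrinks — and bounded by the table's
--     last entry."""
--     radius = WALK_SKILL_TIERS[0][1]
--     for threshold, r in WALK_SKILL_TIERS:
--         if tiles_walked >= threshold: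
--             radius = r
--         else:
--             break
--     return radius
-- ===== SOURCE B (Python) =====
-- import bisect
--
-- WALK_SKILL_TIERS = (
--     (0,   1),
--     (50,  2),
--     (150, 3),
-- )
--
-- _THRESHOLDS = tuple(t for t, _ in WALK_SKILL_TIERS)
-- _RADII = tuple(r for _, r in WALK_SKILL_TIERS)
--
-- def reveal_radius_for(tiles_walked):
--     idx = bisect.bisect_right(_THRESHOLDS, tiles_walked)
--     return _RADII[max(0, idx - 1)]
-- ===== Notes on version B (the rewrite author's own statement) =====
-- stated objective: idiomatic
-- what changed: Replaces the early-breaking linear scan over the tier table with a loop-free bisect_right lookup into precomputed threshold/radius tuples, clamping the index so inputs below the first threshold get the first radius.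
import Mathlib
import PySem

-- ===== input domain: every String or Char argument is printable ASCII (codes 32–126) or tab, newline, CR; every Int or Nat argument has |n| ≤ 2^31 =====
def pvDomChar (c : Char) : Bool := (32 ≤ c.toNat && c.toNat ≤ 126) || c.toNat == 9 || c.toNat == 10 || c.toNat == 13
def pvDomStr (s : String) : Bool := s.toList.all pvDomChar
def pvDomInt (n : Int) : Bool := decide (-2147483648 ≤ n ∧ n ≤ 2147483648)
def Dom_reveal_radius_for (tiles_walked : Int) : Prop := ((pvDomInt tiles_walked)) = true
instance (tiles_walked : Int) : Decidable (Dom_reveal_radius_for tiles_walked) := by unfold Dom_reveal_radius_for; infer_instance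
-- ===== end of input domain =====

-- B replaces A's early-breaking linear scan of the tier table with an idiomatic
-- bisect_right lookup into precomputed threshold/radius tuples (clamped index); same values.


-- ===== PORT A =====
-- WALK_SKILL_TIERS
def walkSkillTiers : List (Int × Int) := [(0, 1), (50, 2), (150, 3)]

-- the for-loop with its break: recursion over the remaining tiers carrying `radius`
def revealLoopA (tiles_walked : Int) (radius : Int) : List (Int × Int) → Int
  | [] => radius
  | (threshold, r) :: rest =>
    if tiles_walked ≥ threshold then revealLoopA tiles_walked r rest
    else radius

def reveal_radius_for (tiles_walked : Int) : Int :=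
  revealLoopA tiles_walked (walkSkillTiers.headD (0, 0)).2 walkSkillTiers

-- ===== PORT B =====
-- _THRESHOLDS and _RADII, precomputed from WALK_SKILL_TIERS
def altThresholds : List Int := walkSkillTiers.map (·.1)
def altRadii : List Int := walkSkillTiers.map (·.2)

def reveal_radius_for_alt (tiles_walked : Int) : Int :=
  let idx : Nat := PySem.List.bisectRight altThresholds tiles_walked
  -- _RADII[max(0, idx - 1)]; the index is always in range, so getD's default is never used
  (PySem.List.pyGet? altRadii (max 0 ((idx : Int) - 1))).getD 0

-- ===== PRECONDITION & SPEC =====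
def Spec_reveal_radius_for (tiles_walked : Int) (out : Int) : Prop := out = reveal_radius_for_alt tiles_walked
instance (tiles_walked : Int) (out : Int) : Decidable (Spec_reveal_radius_for tiles_walked out) := by unfold Spec_reveal_radius_for; infer_instance

-- ===== CLAIM (what is proved, stated in full; the proofs are below) =====
def Claim_equal_reveal_radius_for : Prop := ∀ (tiles_walked : Int), Dom_reveal_radius_for tiles_walked → Spec_reveal_radius_for tiles_walked (reveal_radius_for tiles_walked)

-- ===== LEMMAS AND PROOFS =====

-- bisect_right on the concrete threshold list, characterised via PySem.List.bisectRight_spec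
theorem bisectRight_thresholds (x : Int) : PySem.List.bisectRight altThresholds x =
    if x < 0 then 0 else if x < 50 then 1 else if x < 150 then 2 else 3 := by
  have htl : altThresholds = [(0 : Int), 50, 150] := by decide
  rw [htl]
  obtain ⟨hle, hlo, hhi⟩ := PySem.List.bisectRight_spec [0, 50, 150] x (by norm_num)
  have h0l := hlo 0 (by norm_num); have h1l := hlo 1 (by norm_num); have h2l := hlo 2 (by norm_num)
  have h0h := hhi 0 (by norm_num); have h1h := hhi 1 (by norm_num); have h2h := hhi 2 (by norm_num)
  simp only [List.length_cons, List.length_nil, List.getElem_cons_zero,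
    List.getElem_cons_succ] at *
  split_ifs <;> omega

-- ===== VERDICT (by name: the statement is the Claim_ definition above) =====
theorem reveal_radius_for_spec : Claim_equal_reveal_radius_for := by
  intro x _
  unfold Spec_reveal_radius_for
  simp only [reveal_radius_for, reveal_radius_for_alt, bisectRight_thresholds]
  by_cases h0 : x < 0 <;> by_cases h1 : x < 50 <;> by_cases h2 : x < 150 <;>
    simp [walkSkillTiers, altRadii, revealLoopA, PySem.List.pyGet?, PySem.List.pyIdx?,
      h0, h1, h2] <;> omega
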